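-- pv_equiv track=rewrite | github.com/MengYYY369/Rvmat-Creator | src/modules/rvmat_processor.py | _replace_stage3_texture
-- ===== SOURCE A (Python) =====
-- def _replace_stage3_texture(content, new_texture_path):
--     """替换 Stage3 中的 texture 参数"""
--     lines = content.split('\n')
--     in_stage3 = False
--     modified_lines = []
--
--     for line in lines:
--         # 检查是否进入 Stage3 块
--         if 'class Stage3' in line:
--             in_stage3 = True
--             modified_lines.append(line)
--             continue
--
--         # 检查是否离开 Stage3 块
--         if in_stage3 and line.strip().startswith('};'):
--             in_stage3 = False
--             modified_lines.append(line)
--             continue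
--
--         # 如果在 Stage3 块中，查找并替换 texture 参数
--         if in_stage3 and 'texture=' in line:
--             # 替换 texture 路径
--             modified_line = line.split('texture=')[0] + f'texture="{new_texture_path}";'
--             modified_lines.append(modified_line)
--         else:
--             modified_lines.append(line)
--
--     return '\n'.join(modified_lines)
-- ===== SOURCE B (Python) =====
-- def _replace_stage3_texture(content, new_texture_path):
--     """Two-pass: mark the line indices strictly inside the Stage3 block, then rewrite statelessly."""
--     lines = content.split('\n')
--     inside = set()
--     state = False
--     for i, line in enumerate(lines):
--         if 'class Stage3' in line:
--             state = True
--         elif state and line.strip().startswith('};'):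
--             state = False
--         elif state:
--             inside.add(i)
--     return '\n'.join(
--         line.split('texture=')[0] + f'texture="{new_texture_path}";'
--         if i in inside and 'texture=' in line else line
--         for i, line in enumerate(lines))
-- ===== Notes on version B (the rewrite author's own statement) =====
-- stated objective: alternative
-- what changed: Replaces the single stateful rewrite loop by a first pass that marks the indices strictly inside the Stage3 block and a second stateless enumerate-map pass that rewrites exactly the marked texture lines.
import Mathlib
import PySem

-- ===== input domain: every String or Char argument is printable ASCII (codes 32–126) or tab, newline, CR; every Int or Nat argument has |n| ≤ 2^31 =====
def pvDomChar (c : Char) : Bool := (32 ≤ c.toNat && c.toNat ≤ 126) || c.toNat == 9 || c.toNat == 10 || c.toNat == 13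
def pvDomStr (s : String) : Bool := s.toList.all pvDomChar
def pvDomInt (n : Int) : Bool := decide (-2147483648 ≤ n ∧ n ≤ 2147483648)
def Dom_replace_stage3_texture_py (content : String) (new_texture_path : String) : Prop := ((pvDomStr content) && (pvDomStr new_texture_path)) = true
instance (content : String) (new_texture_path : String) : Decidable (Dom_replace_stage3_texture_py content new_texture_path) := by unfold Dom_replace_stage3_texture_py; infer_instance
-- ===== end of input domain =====

-- B rewrites A's single stateful loop as a mark-indices pass plus a stateless rewrite pass (alternative decomposition, same cost).

-- ===== PORT A =====
-- the replacement text both Pythons build: line.split('texture=')[0] + f'texture="{ntp}";'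
def pvRepl (ntp : String) (line : String) : String :=
  (PySem.List.pyGetD ((PySem.Str.split? line "texture=").getD []) 0 "") ++ "texture=\"" ++ ntp ++ "\";"

-- A's for-loop: state in_stage3, appending to modified_lines (structural recursion over the lines)
def pvA_loop (ntp : String) : Bool → List String → List String
  | _, [] => []
  | st, line :: rest =>
    if PySem.Str.isIn "class Stage3" line then
      line :: pvA_loop ntp true rest
    else if st && PySem.Str.startswith (PySem.Str.strip line) "};" then
      line :: pvA_loop ntp false rest
    else if st && PySem.Str.isIn "texture=" line then
      pvRepl ntp line :: pvA_loop ntp st rest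
    else
      line :: pvA_loop ntp st rest

def replace_stage3_texture_py (content : String) (new_texture_path : String) : String :=
  PySem.Str.join "\n" (pvA_loop new_texture_path false ((PySem.Str.split? content "\n").getD []))

-- ===== PORT B =====
-- pass 1: fold over enumerate(lines), adding to a set the indices strictly inside the Stage3 block
def pvB_step (p : Bool × PySem.Set Int) (il : Int × String) : Bool × PySem.Set Int :=
  if PySem.Str.isIn "class Stage3" il.2 then (true, p.2)
  else if p.1 && PySem.Str.startswith (PySem.Str.strip il.2) "};" then (false, p.2)
  else if p.1 then (p.1, PySem.Set.add p.2 il.1)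
  else p

def pvB_marks (lines : List String) : PySem.Set Int :=
  ((PySem.List.enumerate lines 0).foldl pvB_step (false, PySem.Set.empty)).2

-- pass 2: stateless rewrite of the marked texture lines
def pvB_emit (ntp : String) (inside : PySem.Set Int) (il : Int × String) : String :=
  if PySem.Set.contains inside il.1 && PySem.Str.isIn "texture=" il.2 then pvRepl ntp il.2
  else il.2

def replace_stage3_texture_py_alt (content : String) (new_texture_path : String) : String :=
  let lines := (PySem.Str.split? content "\n").getD []
  let inside := pvB_marks lines
  PySem.Str.join "\n" ((PySem.List.enumerate lines 0).map (pvB_emit new_texture_path inside))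

-- ===== PRECONDITION & SPEC =====
def Spec_replace_stage3_texture_py (content : String) (new_texture_path : String) (out : String) : Prop := out = replace_stage3_texture_py_alt content new_texture_path
instance (content : String) (new_texture_path : String) (out : String) : Decidable (Spec_replace_stage3_texture_py content new_texture_path out) := by unfold Spec_replace_stage3_texture_py; infer_instance

-- ===== CLAIM (what is proved, stated in full; the proofs are below) =====
def Claim_equal_replace_stage3_texture_py : Prop := ∀ (content : String) (new_texture_path : String), Dom_replace_stage3_texture_py content new_texture_path → Spec_replace_stage3_texture_py content new_texture_path (replace_stage3_texture_py content new_texture_path)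

-- ===== LEMMAS AND PROOFS =====

-- abstract form of B's pass-1 continuation: the indices it marks from state st at line index i
def pvMarksRec : Bool → Int → List String → List Int
  | _, _, [] => []
  | st, i, line :: rest =>
    if PySem.Str.isIn "class Stage3" line then pvMarksRec true (i + 1) rest
    else if st && PySem.Str.startswith (PySem.Str.strip line) "};" then pvMarksRec false (i + 1) rest
    else if st then i :: pvMarksRec st (i + 1) rest
    else pvMarksRec st (i + 1) rest

theorem pvMarksRec_ge : ∀ (lines : List String) (st : Bool) (i : Int),
    ∀ x ∈ pvMarksRec st i lines, i ≤ x := by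
  intro lines
  induction lines with
  | nil => intro st i x hx; simp [pvMarksRec] at hx
  | cons line rest ih =>
    intro st i x hx
    simp only [pvMarksRec] at hx
    split_ifs at hx with h1 h2 h3
    · have := ih true (i + 1) x hx; omega
    · have := ih false (i + 1) x hx; omega
    · rcases List.mem_cons.mp hx with h | h
      · omega
      · have := ih st (i + 1) x h; omega
    · have := ih st (i + 1) x hx; omega

theorem pvMarksRec_not_mem (rest : List String) (st : Bool) (i : Int) :
    i ∉ pvMarksRec st (i + 1) rest := by
  intro hmem
  have := pvMarksRec_ge rest st (i + 1) i hmem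
  omega

theorem pvB_fold_eq : ∀ (lines : List String) (st : Bool) (s : PySem.Set Int) (i : Int),
    (∀ x ∈ s, x < i) →
    ((PySem.List.enumerate lines i).foldl pvB_step (st, s)).2 = s ++ pvMarksRec st i lines := by
  intro lines
  induction lines with
  | nil => intro st s i _; simp [PySem.List.enumerate_nil, pvMarksRec]
  | cons line rest ih =>
    intro st s i hs
    rw [PySem.List.enumerate_cons]
    simp only [List.foldl_cons, pvB_step, pvMarksRec]
    split_ifs with h1 h2 h3
    · rw [ih true s (i + 1) (by intro x hx; have := hs x hx; omega)]
    · rw [ih false s (i + 1) (by intro x hx; have := hs x hx; omega)]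
    · have hni : i ∉ s := fun hmem => by have := hs i hmem; omega
      have hadd : PySem.Set.add s i = s ++ [i] := PySem.Set.add_of_not_mem hni
      rw [hadd, ih st (s ++ [i]) (i + 1) ?_]
      · simp
      · intro x hx
        rcases List.mem_append.mp hx with h | h
        · have := hs x h; omega
        · simp at h; omega
    · rw [ih st s (i + 1) (by intro x hx; have := hs x hx; omega)]

theorem pvB_emit_congr (ntp : String) (S S' : PySem.Set Int) (i : Int) (rest : List String)
    (hSS' : ∀ j, i ≤ j → (PySem.Set.contains S j = PySem.Set.contains S' j)) :
    (PySem.List.enumerate rest i).map (pvB_emit ntp S)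
      = (PySem.List.enumerate rest i).map (pvB_emit ntp S') := by
  apply List.map_congr_left
  intro p hp
  rcases (PySem.List.mem_enumerate_iff _ _ _).mp hp with ⟨k, hk, rfl⟩
  simp only [pvB_emit]
  rw [hSS' (i + k) (by omega)]

theorem pvB_contains_cons_of_lt (M : List Int) (i j : Int) (hij : i < j) :
    PySem.Set.contains M j = PySem.Set.contains (i :: M) j := by
  simp [PySem.Set.contains]
  intro h
  exact absurd h (by omega)

theorem pvMain : ∀ (rest : List String) (ntp : String) (st : Bool) (i : Int),
    pvA_loop ntp st rest
      = (PySem.List.enumerate rest i).map (pvB_emit ntp (pvMarksRec st i rest)) := by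
  intro rest
  induction rest with
  | nil => intro ntp st i; simp [pvA_loop, PySem.List.enumerate_nil]
  | cons line rest ih =>
    intro ntp st i
    rw [PySem.List.enumerate_cons]
    have hnotin : ∀ (st' : Bool),
        PySem.Set.contains (pvMarksRec st' (i + 1) rest) i = false := by
      intro st'
      have := pvMarksRec_not_mem rest st' i
      simp [PySem.Set.contains, this]
    have hun : ∀ (st' : Bool), pvB_emit ntp (pvMarksRec st' (i + 1) rest) (i, line) = line := by
      intro st'
      simp only [pvB_emit, hnotin st', Bool.false_and, Bool.false_eq_true, if_false]
    have htail : ∀ (st' : Bool),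
        (PySem.List.enumerate rest (i + 1)).map (pvB_emit ntp (pvMarksRec st' (i + 1) rest))
          = (PySem.List.enumerate rest (i + 1)).map
              (pvB_emit ntp (i :: pvMarksRec st' (i + 1) rest)) := by
      intro st'
      exact pvB_emit_congr ntp _ _ (i + 1) rest
        (fun j hj => pvB_contains_cons_of_lt _ i j (by omega))
    by_cases h1 : PySem.Str.isIn "class Stage3" line = true
    · simp only [pvA_loop, pvMarksRec, h1, if_true, List.map_cons]
      rw [ih ntp true (i + 1), hun true]
    · have h1' : PySem.Str.isIn "class Stage3" line = false := by simpa using h1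
      cases st with
      | false =>
        simp only [pvA_loop, pvMarksRec, h1', Bool.false_and, Bool.false_eq_true, if_false,
          List.map_cons]
        rw [ih ntp false (i + 1), hun false]
      | true =>
        by_cases h2 : PySem.Str.startswith (PySem.Str.strip line) "};" = true
        · simp only [pvA_loop, pvMarksRec, h1', h2, Bool.true_and, Bool.false_eq_true, if_false,
            if_true, List.map_cons]
          rw [ih ntp false (i + 1), hun false]
        · have h2' : PySem.Str.startswith (PySem.Str.strip line) "};" = false := by simpa using h2
          by_cases h3 : PySem.Str.isIn "texture=" line = true
          · simp only [pvA_loop, pvMarksRec, h1', h2', h3, Bool.true_and, Bool.false_eq_true,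
              if_false, if_true, List.map_cons]
            rw [ih ntp true (i + 1)]
            have hc : PySem.Set.contains (i :: pvMarksRec true (i + 1) rest) i = true := by
              simp [PySem.Set.contains]
            rw [htail true]
            have hhead : pvB_emit ntp (i :: pvMarksRec true (i + 1) rest) (i, line)
                = pvRepl ntp line := by
              simp only [pvB_emit, hc, h3, Bool.and_self, if_true]
            rw [hhead]
          · have h3' : PySem.Str.isIn "texture=" line = false := by simpa using h3
            simp only [pvA_loop, pvMarksRec, h1', h2', h3', Bool.true_and, Bool.false_eq_true,
              if_false, if_true, List.map_cons]
            rw [ih ntp true (i + 1)]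
            rw [htail true]
            have hhead : pvB_emit ntp (i :: pvMarksRec true (i + 1) rest) (i, line) = line := by
              simp only [pvB_emit, h3', Bool.and_false, Bool.false_eq_true, if_false]
            rw [hhead]

-- ===== VERDICT (by name: the statement is the Claim_ definition above) =====
theorem replace_stage3_texture_py_spec : Claim_equal_replace_stage3_texture_py := by
  intro content ntp _
  unfold Spec_replace_stage3_texture_py replace_stage3_texture_py replace_stage3_texture_py_alt
  simp only [pvB_marks]
  rw [pvB_fold_eq ((PySem.Str.split? content "\n").getD []) false PySem.Set.empty 0
        (by intro x hx; simp [PySem.Set.empty] at hx)]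
  rw [pvMain ((PySem.Str.split? content "\n").getD []) ntp false 0]
  rfl
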